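-- pv_equiv track=rewrite | github.com/mtien/Sliding_window_analysis | assign_window.py | combineWindows
-- ===== SOURCE A (Python) =====
-- def combineWindows(geneID_dictionary):
-- 	sorted_windows= sorted(geneID_dictionary)
-- 	new_dic= {}
--
-- 	working_window=sorted_windows[0]
-- 	working_left= geneID_dictionary[working_window][0]
-- 	working_right= geneID_dictionary[working_window][1]
--
-- 	previous_window=sorted_windows[0]
-- 	for s in range(1,len(sorted_windows)):
-- 		window=sorted_windows[s]
-- 		if( window-previous_window == 1):
-- 			working_right= geneID_dictionary[window][1]
-- 		else:
-- 			window_ID= "W_" + str(working_window)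
-- 			new_dic[window_ID]=[working_left,working_right]
-- 			working_window=window
-- 			working_left= geneID_dictionary[window][0]
-- 			working_right= geneID_dictionary[window][1]
-- 		previous_window= window
-- 	window_ID= "W_" + str(working_window)
-- 	new_dic[window_ID]=[working_left,working_right]
--
-- 	return new_dic
-- ===== SOURCE B (Python) =====
-- def combineWindows(geneID_dictionary):
-- 	# Two phases: first partition the sorted keys into maximal runs of
-- 	# consecutive integers (kept as [first, last] pairs), then map each
-- 	# run to its combined interval.
-- 	runs = []
-- 	for k in sorted(geneID_dictionary):
-- 		if runs and k - runs[-1][1] == 1: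
-- 			runs[-1][1] = k
-- 		else:
-- 			runs.append([k, k])
-- 	new_dic = {}
-- 	for f, l in runs:
-- 		new_dic["W_" + str(f)] = [geneID_dictionary[f][0], geneID_dictionary[l][1]]
-- 	return new_dic
-- ===== Notes on version B (the rewrite author's own statement) =====
-- stated objective: alternative
-- what changed: B splits the computation into two explicit phases -- partition the sorted keys into maximal runs of consecutive integers (as [first,last] pairs), then map each run to its combined interval -- instead of A's single pass that threads working_window/working_left/working_right/previous_window state and emits on the break and after the loop.
import Mathlib
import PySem

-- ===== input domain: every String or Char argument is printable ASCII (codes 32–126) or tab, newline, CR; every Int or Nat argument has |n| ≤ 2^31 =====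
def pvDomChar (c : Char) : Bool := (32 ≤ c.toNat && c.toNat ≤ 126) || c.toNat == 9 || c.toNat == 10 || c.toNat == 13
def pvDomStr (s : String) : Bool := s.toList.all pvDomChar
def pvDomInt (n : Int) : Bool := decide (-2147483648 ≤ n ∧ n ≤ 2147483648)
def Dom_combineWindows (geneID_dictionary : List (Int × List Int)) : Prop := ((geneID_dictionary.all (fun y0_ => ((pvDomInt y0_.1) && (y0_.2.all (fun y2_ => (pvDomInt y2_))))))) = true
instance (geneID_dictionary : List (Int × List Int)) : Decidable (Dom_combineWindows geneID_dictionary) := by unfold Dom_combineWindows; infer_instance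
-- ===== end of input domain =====

-- B replaces A's threaded working_left/working_right/previous_window state machine by two
-- phases (partition sorted keys into maximal consecutive runs, then map each run to its
-- interval); objective: alternative decomposition, same cost.


-- ===== PORT A =====
-- geneID_dictionary[k][0] / [1]; Pre_ guarantees the key is present and the value has ≥ 2
-- elements, so the defaults are never read on admitted inputs.
def pvVal0 (d : PySem.Dict Int (List Int)) (k : Int) : Int :=
  PySem.List.pyGetD (d.getD k []) 0 0
def pvVal1 (d : PySem.Dict Int (List Int)) (k : Int) : Int :=
  PySem.List.pyGetD (d.getD k []) 1 0

-- the body of A's for-loop, on state (new_dic, working_window, working_left, working_right, previous_window)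
def pvStepA (d : PySem.Dict Int (List Int))
    (st : PySem.Dict String (List Int) × Int × Int × Int × Int) (window : Int) :
    PySem.Dict String (List Int) × Int × Int × Int × Int :=
  let (new_dic, working_window, working_left, working_right, previous_window) := st
  if window - previous_window == 1 then
    (new_dic, working_window, working_left, pvVal1 d window, window)
  else
    (new_dic.insert ("W_" ++ PySem.Int.toStr working_window) [working_left, working_right],
      window, pvVal0 d window, pvVal1 d window, window)

def combineWindows (geneID_dictionary : List (Int × List Int)) : List (String × List Int) :=
  let d := PySem.Dict.ofList geneID_dictionary
  let sorted_windows := PySem.List.sorted d.keys (fun x => x) false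
  -- sorted_windows[0]: IndexError on empty input, excluded by Pre_ (default never read there)
  let working_window := PySem.List.pyGetD sorted_windows 0 0
  let st := (PySem.List.pyRange 1 (sorted_windows.length : Int) 1).foldl
      (fun st s => pvStepA d st (PySem.List.pyGetD sorted_windows s 0))
      (PySem.Dict.empty, working_window, pvVal0 d working_window, pvVal1 d working_window,
        working_window)
  (st.1.insert ("W_" ++ PySem.Int.toStr st.2.1) [st.2.2.1, st.2.2.2.1]).items

-- ===== PORT B =====
-- the body of B's first loop: extend the last run or start a new one
def pvStepB (runs : List (Int × Int)) (k : Int) : List (Int × Int) :=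
  match runs.getLast? with
  | some (f, l) => if k - l == 1 then runs.dropLast ++ [(f, k)] else runs ++ [(k, k)]
  | none => [(k, k)]

def combineWindows_alt (geneID_dictionary : List (Int × List Int)) : List (String × List Int) :=
  let d := PySem.Dict.ofList geneID_dictionary
  let runs := (PySem.List.sorted d.keys (fun x => x) false).foldl pvStepB []
  (runs.foldl
      (fun nd fl =>
        nd.insert ("W_" ++ PySem.Int.toStr fl.1) [pvVal0 d fl.1, pvVal1 d fl.2])
      PySem.Dict.empty).items

-- ===== PRECONDITION & SPEC =====
-- Pre_ excludes the inputs on which Python A raises IndexError: the empty dictionary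
-- (sorted_windows[0]) and dictionaries with a value of fewer than 2 elements (value[1]).
def Pre_combineWindows (geneID_dictionary : List (Int × List Int)) : Prop :=
  geneID_dictionary ≠ [] ∧
    ∀ p ∈ (PySem.Dict.ofList geneID_dictionary).items, 2 ≤ p.2.length
instance (geneID_dictionary : List (Int × List Int)) : Decidable (Pre_combineWindows geneID_dictionary) := by
  unfold Pre_combineWindows; infer_instance
def pvWitness_combineWindows : (List (Int × List Int)) := [(3, [10, 20]), (4, [21, 30]), (8, [50, 60])]

def Spec_combineWindows (geneID_dictionary : List (Int × List Int)) (out : List (String × List Int)) : Prop := out = combineWindows_alt geneID_dictionary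
instance (geneID_dictionary : List (Int × List Int)) (out : List (String × List Int)) : Decidable (Spec_combineWindows geneID_dictionary out) := by unfold Spec_combineWindows; infer_instance

-- ===== CLAIM (what is proved, stated in full; the proofs are below) =====
def Claim_equal_combineWindows : Prop := ∀ (geneID_dictionary : List (Int × List Int)), Dom_combineWindows geneID_dictionary → Pre_combineWindows geneID_dictionary → Spec_combineWindows geneID_dictionary (combineWindows geneID_dictionary)

-- ===== LEMMAS AND PROOFS =====

-- the maximal consecutive runs of f :: (l's continuation) … : current run is [f..l], remaining keys ks
def pvRuns (f l : Int) : List Int → List (Int × Int)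
  | [] => [(f, l)]
  | w :: ks => if w - l == 1 then pvRuns f w ks else (f, l) :: pvRuns w w ks

theorem pvStepB_loop (ks : List Int) :
    ∀ (rs : List (Int × Int)) (f l : Int),
      ks.foldl pvStepB (rs ++ [(f, l)]) = rs ++ pvRuns f l ks := by
  induction ks with
  | nil => intro rs f l; simp [pvRuns]
  | cons w ks ih =>
    intro rs f l
    simp only [List.foldl_cons, pvStepB, List.getLast?_concat, List.dropLast_concat, pvRuns]
    by_cases h : w - l == 1
    · simp [h, ih]
    · simp only [h, Bool.false_eq_true, if_false]
      rw [ih (rs ++ [(f, l)]) w w]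
      simp

-- my literal form of PySem.List.foldl_pyRange_pyGetD' (the library statement's numeral
-- instances differ syntactically from the port's; the proof is just the library lemma)
theorem pvRangeFold {α β : Type} (xs : List α) (d : α) (f : β → α → β) (init : β) :
    List.foldl (fun acc j => f acc (PySem.List.pyGetD xs j d)) init
        (PySem.List.pyRange 1 (xs.length : Int) 1) =
      List.foldl f init (xs.drop 1) :=
  PySem.List.foldl_pyRange_pyGetD' xs d f init (by norm_num)

theorem pvStepA_loop (d : PySem.Dict Int (List Int)) (ks : List Int) :
    ∀ (nd : PySem.Dict String (List Int)) (f l : Int),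
      (let st := ks.foldl (pvStepA d) (nd, f, pvVal0 d f, pvVal1 d l, l)
       st.1.insert ("W_" ++ PySem.Int.toStr st.2.1) [st.2.2.1, st.2.2.2.1]) =
      (pvRuns f l ks).foldl
        (fun nd fl => nd.insert ("W_" ++ PySem.Int.toStr fl.1) [pvVal0 d fl.1, pvVal1 d fl.2]) nd := by
  induction ks with
  | nil => intro nd f l; simp [pvRuns]
  | cons w ks ih =>
    intro nd f l
    simp only [List.foldl_cons, pvStepA, pvRuns]
    by_cases h : w - l == 1
    · simp only [h, if_true]
      exact ih nd f w
    · simp only [h, Bool.false_eq_true, if_false, List.foldl_cons]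
      exact ih _ w w

-- ===== VERDICT (by name: the statement is the Claim_ definition above) =====
theorem combineWindows_main (g : List (Int × List Int)) (hpre : Pre_combineWindows g) :
    combineWindows g = combineWindows_alt g := by
  have hne : PySem.List.sorted (PySem.Dict.ofList g).keys (fun x => x) false ≠ [] := by
    have hk : (PySem.Dict.ofList g).keys ≠ [] := by
      obtain ⟨p, t, rfl⟩ := List.exists_cons_of_ne_nil hpre.1
      have hm : p.1 ∈ (PySem.Dict.ofList (p :: t)).keys := by
        rw [PySem.Dict.ofList, PySem.Dict.update, PySem.Dict.keys_foldl_insert_key]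
        simp [pysem]
      exact List.ne_nil_of_mem hm
    intro h
    have hperm := PySem.List.sorted_perm (xs := (PySem.Dict.ofList g).keys)
      (key := fun x => x) (rev := false)
    rw [h] at hperm
    exact hk (List.Perm.nil_eq hperm).symm
  obtain ⟨k0, rest, hcons⟩ := List.exists_cons_of_ne_nil hne
  simp only [combineWindows, combineWindows_alt, hcons]
  have h0 : PySem.List.pyGetD (k0 :: rest) 0 0 = k0 := by
    simp [PySem.List.pyGetD, PySem.List.pyGet?, PySem.List.pyIdx?]
  rw [h0]
  rw [pvRangeFold (k0 :: rest) 0 (pvStepA (PySem.Dict.ofList g))]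
  have hdrop : (k0 :: rest).drop 1 = rest := by simp
  rw [hdrop]
  have hB : (k0 :: rest).foldl pvStepB [] = pvRuns k0 k0 rest := by
    simpa using pvStepB_loop rest [] k0 k0
  rw [hB]
  rw [← pvStepA_loop (PySem.Dict.ofList g) rest PySem.Dict.empty k0 k0]

theorem combineWindows_spec : Claim_equal_combineWindows :=
  fun g _ hpre => combineWindows_main g hpre
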